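-- pv_equiv track=rewrite | github.com/wolframhwang/Challengers | Algorithm/모두 0으로 만들기/sangdo_모두 0으로 만들기.py | solution
-- ===== SOURCE A (Python) =====
-- def solution(a, edges):
--     n = len(a)
--     adj = [[] for _ in range(n)]
--
--     for f,t in edges:
--         adj[f].append(t)
--         adj[t].append(f)
--
--     def getSum(prev, now,a, adj):
--         ret = 0
--         for nxt in adj[now]:
--             if prev == nxt:
--                 continue
--             ret += getSum(now, nxt, a, adj)
--             a[now] += a[nxt]
--         return ret + abs(a[now])
--     ret = getSum(-1,0, a,adj)
--     return ret if a[0] == 0 else -1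
-- ===== SOURCE B (Python) =====
-- def solution(a, edges):
--     n = len(a)
--     adj = [[] for _ in range(n)]
--     for f, t in edges:
--         adj[f].append(t)
--         adj[t].append(f)
--     total = 0
--     stack = [('enter', -1, 0)]        # defunctionalized getSum: enter/add/done frames
--     while stack:
--         tag, x, y = stack.pop()
--         if tag == 'enter':            # x = prev, y = now
--             frames = [('done', y, y)]
--             for c in reversed(adj[y]):
--                 if c != x:
--                     frames.append(('add', y, c))
--                     frames.append(('enter', y, c))
--             stack.extend(frames)
--         elif tag == 'add':            # a[x] += a[y], the caller's post-child update
--             a[x] += a[y]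
--         else:                         # 'done': post-order, count |a[y]|
--             total += abs(a[y])
--     return total if a[0] == 0 else -1
-- ===== Notes on version B (the rewrite author's own statement) =====
-- stated objective: alternative
-- what changed: A's recursive getSum DFS is replaced by an explicit iterative stack machine (a defunctionalized post-order DFS with enter/add/done frames) that performs the same updates without Python recursion.
-- outside the precondition, e.g. on solution([0, 6, 171, 1, 2], [(-2, 3)]): A returns 0, B returns 0; on solution([2, 9, 10], [(-2, 2), (-1, 2)]): A returns -1, B returns -1
import Mathlib
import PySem

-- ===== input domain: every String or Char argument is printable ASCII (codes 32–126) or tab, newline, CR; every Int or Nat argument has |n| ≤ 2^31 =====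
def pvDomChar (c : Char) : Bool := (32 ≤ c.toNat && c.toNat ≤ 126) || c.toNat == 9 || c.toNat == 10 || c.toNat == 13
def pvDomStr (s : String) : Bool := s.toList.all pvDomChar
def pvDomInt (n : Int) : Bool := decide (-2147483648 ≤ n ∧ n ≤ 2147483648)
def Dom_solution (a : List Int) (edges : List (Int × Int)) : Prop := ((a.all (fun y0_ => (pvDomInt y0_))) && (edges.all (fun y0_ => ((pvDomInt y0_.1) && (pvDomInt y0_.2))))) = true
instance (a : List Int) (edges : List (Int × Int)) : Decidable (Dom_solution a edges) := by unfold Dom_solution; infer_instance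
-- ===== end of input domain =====

-- B replaces A's recursive getSum by an explicit iterative stack machine (defunctionalized
-- post-order DFS with enter/add/done frames; objective: alternative decomposition, same cost).
-- Both Pythons mutate the list `a` in place identically; the theorems are about the return value.
-- The ports carry a depth fuel (A) / per-frame fuel (B) purely as a totalization guard, consumed
-- in lockstep; the index helpers below implement Python's negative-index wraparound exactly for
-- the -len(a) ≤ i < len(a) indices Pre_solution admits.

-- shared index helpers and adjacency building (both Pythons build adj with the same two appends)
def wrapIdx (len : Nat) (i : Int) : Nat := if 0 ≤ i then i.toNat else (i + len).toNat
def pyGetI (a : List Int) (i : Int) : Int := a.getD (wrapIdx a.length i) 0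
def pySetI (a : List Int) (i : Int) (x : Int) : List Int := a.set (wrapIdx a.length i) x
def appendAt (adj : List (List Int)) (i : Int) (x : Int) : List (List Int) :=
  adj.modify (wrapIdx adj.length i) (· ++ [x])
def buildAdj (n : Nat) (edges : List (Int × Int)) : List (List Int) :=
  edges.foldl (fun adj e => appendAt (appendAt adj e.1 e.2) e.2 e.1) (List.replicate n [])
def adjAt (adj : List (List Int)) (i : Int) : List Int := adj.getD (wrapIdx adj.length i) []

-- ===== PORT A =====
-- A's recursive getSum returns (ret, updated a); goA is the `for nxt in adj[now]` loop.
mutual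
def getSumA (adj : List (List Int)) : Nat → Int → Int → List Int → Int × List Int
  | 0, _, _, a => (0, a)
  | f+1, prev, now, a =>
    ((goA adj f prev now (adjAt adj now) 0 a).1
       + |pyGetI (goA adj f prev now (adjAt adj now) 0 a).2 now|,
     (goA adj f prev now (adjAt adj now) 0 a).2)
termination_by f => (f, 0)

def goA (adj : List (List Int)) (f : Nat) (prev now : Int) : List Int → Int → List Int → Int × List Int
  | [], ret, a => (ret, a)
  | c :: cs, ret, a =>
    if prev = c then goA adj f prev now cs ret a
    else
      goA adj f prev now cs (ret + (getSumA adj f now c a).1)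
        (pySetI (getSumA adj f now c a).2 now
          (pyGetI (getSumA adj f now c a).2 now + pyGetI (getSumA adj f now c a).2 c))
termination_by cs => (f, cs.length + 1)
end

def solution (a : List Int) (edges : List (Int × Int)) : Int :=
  let adj := buildAdj a.length edges
  if pyGetI (getSumA adj (2 * a.length + 2) (-1) 0 a).2 0 = 0
  then (getSumA adj (2 * a.length + 2) (-1) 0 a).1 else -1

-- ===== PORT B =====
-- B's explicit stack frames: ('enter', prev, now) carries the totalization fuel here;
-- ('add', now, c) is the caller's a[now] += a[c]; ('done', now) counts |a[now]| post-order.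
inductive DfsFrame where
  | enter : Int → Int → Nat → DfsFrame
  | add : Int → Int → DfsFrame
  | done : Int → DfsFrame
deriving DecidableEq, Repr

def wF (K : Nat) : DfsFrame → Nat
  | .enter _ _ f => K ^ (f + 1)
  | .add _ _ => 1
  | .done _ => 1
def wS (K : Nat) (fs : List DfsFrame) : Nat := (fs.map (wF K)).sum

theorem wS_append (K : Nat) (xs ys : List DfsFrame) : wS K (xs ++ ys) = wS K xs + wS K ys := by
  simp [wS]

theorem wS_children (K f : Nat) (p v : Int) (cs : List Int) :
    wS K (cs.flatMap fun c => if c = p then [] else [DfsFrame.enter v c f, DfsFrame.add v c])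
      ≤ cs.length * (K ^ (f + 1) + 1) := by
  induction cs with
  | nil => simp [wS]
  | cons c cs ih =>
    simp only [wS] at ih ⊢
    by_cases h : c = p
    · simp only [List.flatMap_cons, if_pos h, List.nil_append, List.length_cons]
      nlinarith [ih, Nat.zero_le (K ^ (f + 1))]
    · simp only [List.flatMap_cons, if_neg h, List.cons_append, List.nil_append,
        List.map_cons, List.sum_cons, wF, List.length_cons]
      nlinarith [ih]

def exec (adj : List (List Int)) (K : Nat) (hK : ∀ v : Int, (adjAt adj v).length + 2 ≤ K) :
    List DfsFrame → List Int → Int → List Int × Int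
  | [], a, t => (a, t)
  | .done v :: k, a, t => exec adj K hK k a (t + |pyGetI a v|)
  | .add x y :: k, a, t => exec adj K hK k (pySetI a x (pyGetI a x + pyGetI a y)) t
  | .enter _ _ 0 :: k, a, t => exec adj K hK k a t
  | .enter p v (f+1) :: k, a, t =>
      exec adj K hK
        (((adjAt adj v).flatMap fun c =>
            if c = p then [] else [DfsFrame.enter v c f, DfsFrame.add v c])
          ++ DfsFrame.done v :: k) a t
termination_by fs => wS K fs
decreasing_by
  · simp [wS, wF]
  · simp [wS, wF]
  · have h2 : 2 ≤ K := by have := hK 0; omega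
    simp only [wS, List.map_cons, List.sum_cons, wF]
    have hx : 0 < K ^ (0 + 1) := pow_pos (by omega) _
    omega
  · have h2 : (adjAt adj v).length + 2 ≤ K := hK v
    have hb := wS_children K f p v (adjAt adj v)
    have h0 : 2 ≤ K := by have := hK 0; omega
    have hx : K ≤ K ^ (f + 1) := by
      calc K = K ^ 1 := (pow_one K).symm
      _ ≤ K ^ (f + 1) := Nat.pow_le_pow_right (by omega) (by omega)
    have hmul : ((adjAt adj v).length + 2) * (K ^ (f + 1) + 1) ≤ K * (K ^ (f + 1) + 1) :=
      Nat.mul_le_mul_right _ h2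
    rw [wS_append]
    simp only [wS, List.map_cons, List.sum_cons, wF, Nat.succ_eq_add_one, dite_eq_ite] at *
    have hK2 : K ^ (f + 1 + 1) = K * K ^ (f + 1) := by ring
    nlinarith [hb, hx, hmul, h0]

theorem sumLens_modify (l : List (List Int)) : ∀ (j : Nat) (x : Int),
    ((l.modify j (· ++ [x])).map List.length).sum ≤ (l.map List.length).sum + 1 := by
  induction l with
  | nil => intro j x; simp
  | cons h t ih =>
    intro j x
    cases j with
    | zero => simp [List.modify]; omega
    | succ j =>
      have hstep : ((h :: t).modify (j + 1) (· ++ [x])) = h :: t.modify j (· ++ [x]) := by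
        simp [List.modify]
      rw [hstep]
      have := ih j x
      simp only [List.map_cons, List.sum_cons]
      omega

theorem sumLens_appendAt (adj : List (List Int)) (i x : Int) :
    ((appendAt adj i x).map List.length).sum ≤ (adj.map List.length).sum + 1 := by
  unfold appendAt
  exact sumLens_modify adj _ x

theorem sumLens_buildAux : ∀ (es : List (Int × Int)) (adj : List (List Int)),
    ((es.foldl (fun adj e => appendAt (appendAt adj e.1 e.2) e.2 e.1) adj).map List.length).sum
      ≤ (adj.map List.length).sum + 2 * es.length := by
  intro es
  induction es with
  | nil => intro adj; simp
  | cons e es ih =>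
    intro adj
    have h1 := sumLens_appendAt adj e.1 e.2
    have h2 := sumLens_appendAt (appendAt adj e.1 e.2) e.2 e.1
    have h3 := ih (appendAt (appendAt adj e.1 e.2) e.2 e.1)
    simp only [List.foldl_cons, List.length_cons] at *
    omega

theorem adj_bound (n : Nat) (edges : List (Int × Int)) :
    ∀ v : Int, (adjAt (buildAdj n edges) v).length + 2 ≤ 2 * edges.length + 2 := by
  intro v
  have hsum : ((buildAdj n edges).map List.length).sum ≤ 2 * edges.length := by
    have := sumLens_buildAux edges (List.replicate n [])
    simpa [buildAdj] using this
  have hle : (adjAt (buildAdj n edges) v).length ≤ ((buildAdj n edges).map List.length).sum := by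
    unfold adjAt
    rcases Nat.lt_or_ge (wrapIdx (buildAdj n edges).length v) (buildAdj n edges).length with h | h
    · have hmem : (buildAdj n edges).getD (wrapIdx (buildAdj n edges).length v) [] ∈ buildAdj n edges := by
        rw [List.getD_eq_getElem _ _ h]; exact List.getElem_mem h
      exact List.single_le_sum (by intro x _; exact Nat.zero_le x) _
        (List.mem_map_of_mem hmem)
    · rw [List.getD_eq_default _ _ h]; exact Nat.zero_le _
  omega

def solution_alt (a : List Int) (edges : List (Int × Int)) : Int :=
  let adj := buildAdj a.length edges
  if pyGetI (exec adj (2 * edges.length + 2) (adj_bound a.length edges)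
              [DfsFrame.enter (-1) 0 (2 * a.length + 2)] a 0).1 0 = 0
  then (exec adj (2 * edges.length + 2) (adj_bound a.length edges)
         [DfsFrame.enter (-1) 0 (2 * a.length + 2)] a 0).2
  else -1

-- ===== PRECONDITION & SPEC =====
-- Pre_solution: a is nonempty; every node label lies in [-len(a), len(a)) (Python indexing is
-- total there); no two distinct labels denote the same physical node (no aliasing mod len(a));
-- and the connected component of node 0, over the deduplicated undirected edges, is a tree
-- carrying at most one self-loop.  These are the inputs on which the Python A terminates and
-- its recursion depth stays within the ports' fuel; outside it A raises IndexError, recurses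
-- forever (a cycle, paired self-loops), or returns via accidental label aliasing mod len(a)
-- (negative-index wraparound) — those accidental-return corners are cited in the claim.
def labelsOf (edges : List (Int × Int)) : List Int :=
  PySem.Set.ofList (0 :: edges.flatMap fun e => [e.1, e.2])
def normE (edges : List (Int × Int)) : List (Int × Int) :=
  PySem.Set.ofList (edges.map fun e => if e.1 ≤ e.2 then e else (e.2, e.1))
def growStep (E : List (Int × Int)) (vs : List Int) : List Int :=
  E.foldl (fun vs e => if e.1 ∈ vs ∨ e.2 ∈ vs then PySem.Set.add (PySem.Set.add vs e.1) e.2 else vs) vs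
def compOf (rounds : Nat) (E : List (Int × Int)) : List Int := (growStep E)^[rounds] [0]
def Pre_solution (a : List Int) (edges : List (Int × Int)) : Prop :=
  a ≠ [] ∧
  (∀ l ∈ labelsOf edges, -(a.length : Int) ≤ l ∧ l < (a.length : Int)) ∧
  ((labelsOf edges).map (· % (a.length : Int))).Nodup ∧
  (((normE edges).filter fun e => decide (e.1 ≠ e.2) &&
      decide (e.1 ∈ compOf (2 * edges.length + 2) ((normE edges).filter fun e => decide (e.1 ≠ e.2)))).length + 1
    = (compOf (2 * edges.length + 2) ((normE edges).filter fun e => decide (e.1 ≠ e.2))).length) ∧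
  (((normE edges).filter fun e => decide (e.1 = e.2) &&
      decide (e.1 ∈ compOf (2 * edges.length + 2) ((normE edges).filter fun e => decide (e.1 ≠ e.2)))).length ≤ 1)
instance (a : List Int) (edges : List (Int × Int)) : Decidable (Pre_solution a edges) := by
  unfold Pre_solution; infer_instance

def pvWitness_solution : List Int × (List (Int × Int)) := ([5, -3, -2], [(0, 1), (0, 2)])

def Spec_solution (a : List Int) (edges : List (Int × Int)) (out : Int) : Prop := out = solution_alt a edges
instance (a : List Int) (edges : List (Int × Int)) (out : Int) : Decidable (Spec_solution a edges out) := by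
  unfold Spec_solution; infer_instance

-- ===== CLAIM (what is proved, stated in full; the proofs are below) =====
def Claim_equal_solution : Prop := ∀ (a : List Int) (edges : List (Int × Int)), Dom_solution a edges → Pre_solution a edges → Spec_solution a edges (solution a edges)

-- ===== LEMMAS AND PROOFS =====

theorem goA_shift (adj : List (List Int)) (f : Nat) (p v : Int) :
    ∀ (cs : List Int) (ret : Int) (a : List Int),
      goA adj f p v cs ret a
        = (ret + (goA adj f p v cs 0 a).1, (goA adj f p v cs 0 a).2) := by
  intro cs
  induction cs with
  | nil => intro ret a; simp [goA]
  | cons c cs ih =>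
    intro ret a
    by_cases h : p = c
    · simp only [goA, if_pos h]
      rw [ih, ih 0]
    · simp only [goA, if_neg h]
      rw [ih (ret + (getSumA adj f v c a).1), ih (0 + (getSumA adj f v c a).1)]
      simp only [Prod.mk.injEq, and_true]
      ring

theorem exec_children (adj : List (List Int)) (K : Nat)
    (hK : ∀ v : Int, (adjAt adj v).length + 2 ≤ K) (f : Nat)
    (IH : ∀ (p v : Int) (a : List Int) (t : Int) (k : List DfsFrame),
      exec adj K hK (DfsFrame.enter p v f :: k) a t
        = exec adj K hK k (getSumA adj f p v a).2 (t + (getSumA adj f p v a).1)) :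
    ∀ (cs : List Int) (p v : Int) (a : List Int) (t : Int) (k : List DfsFrame),
      exec adj K hK
        ((cs.flatMap fun c =>
            if c = p then [] else [DfsFrame.enter v c f, DfsFrame.add v c]) ++ k) a t
        = exec adj K hK k (goA adj f p v cs 0 a).2 (t + (goA adj f p v cs 0 a).1) := by
  intro cs
  induction cs with
  | nil => intro p v a t k; simp [goA]
  | cons c cs ih =>
    intro p v a t k
    by_cases h : c = p
    · have h' : p = c := h.symm
      simp only [List.flatMap_cons, if_pos h, goA, if_pos h', List.nil_append]
      exact ih p v a t k
    · have h' : ¬ p = c := fun hh => h hh.symm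
      simp only [List.flatMap_cons, if_neg h, goA, if_neg h', List.cons_append, List.nil_append]
      rw [IH v c a t (DfsFrame.add v c ::
        ((cs.flatMap fun c => if c = p then [] else [DfsFrame.enter v c f, DfsFrame.add v c]) ++ k))]
      rw [show ∀ (a' : List Int) (t' : Int) (k' : List DfsFrame),
            exec adj K hK (DfsFrame.add v c :: k') a' t'
              = exec adj K hK k' (pySetI a' v (pyGetI a' v + pyGetI a' c)) t'
          from fun a' t' k' => by rw [exec]]
      rw [ih p v (pySetI (getSumA adj f v c a).2 v
            (pyGetI (getSumA adj f v c a).2 v + pyGetI (getSumA adj f v c a).2 c))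
          (t + (getSumA adj f v c a).1) k]
      rw [goA_shift adj f p v cs (0 + (getSumA adj f v c a).1)]
      congr 1
      ring

theorem exec_enter (adj : List (List Int)) (K : Nat)
    (hK : ∀ v : Int, (adjAt adj v).length + 2 ≤ K) :
    ∀ (f : Nat) (p v : Int) (a : List Int) (t : Int) (k : List DfsFrame),
      exec adj K hK (DfsFrame.enter p v f :: k) a t
        = exec adj K hK k (getSumA adj f p v a).2 (t + (getSumA adj f p v a).1) := by
  intro f
  induction f with
  | zero => intro p v a t k; simp [exec, getSumA]
  | succ f ihf =>
    intro p v a t k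
    rw [show exec adj K hK (DfsFrame.enter p v (f+1) :: k) a t
        = exec adj K hK
            (((adjAt adj v).flatMap fun c =>
                if c = p then [] else [DfsFrame.enter v c f, DfsFrame.add v c])
              ++ DfsFrame.done v :: k) a t from by rw [exec]]
    rw [exec_children adj K hK f ihf (adjAt adj v) p v a t (DfsFrame.done v :: k)]
    rw [show ∀ (a' : List Int) (t' : Int),
          exec adj K hK (DfsFrame.done v :: k) a' t'
            = exec adj K hK k a' (t' + |pyGetI a' v|) from fun a' t' => by rw [exec]]
    simp only [getSumA]
    ring_nf

theorem solution_spec : Claim_equal_solution := by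
  intro a edges _ _
  unfold Spec_solution solution solution_alt
  dsimp only
  rw [exec_enter (buildAdj a.length edges) (2 * edges.length + 2)
      (adj_bound a.length edges) (2 * a.length + 2) (-1) 0 a 0 []]
  simp [exec]
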